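-- pv_equiv track=rewrite | github.com/Sachin-Mamoru/azure-whatsapp-rag-agent | agent/i18n.py | translate_safety_terms
-- ===== SOURCE A (Python) =====
-- def translate_safety_terms(text: str, target_language: str) -> str:
--     """Translate common safety terms"""
--     safety_translations = {
--         "si": {
--             "safety": "ආරක්ෂාව",
--             "hazard": "අනතුර",
--             "emergency": "හදිසි",
--             "warning": "අනතුරු ඇඟවීම",
--             "danger": "භයානක",
--             "accident": "අනතුර",
--             "prevention": "වැළැක්වීම"
--         },
--         "ta": {
--             "safety": "பாதுகாப்பு",
--             "hazard": "ஆபத்து",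
--             "emergency": "அவசரநிலை",
--             "warning": "எச்சரிக்கை",
--             "danger": "ஆபத்து",
--             "accident": "விபத்து",
--             "prevention": "தடுப்பு"
--         }
--     }
--
--     if target_language not in safety_translations:
--         return text
--
--     translations = safety_translations[target_language]
--     translated_text = text
--
--     for english_term, translated_term in translations.items():
--         translated_text = translated_text.replace(english_term, translated_term)
--
--     return translated_text
-- ===== SOURCE B (Python) =====
-- def translate_safety_terms(text: str, target_language: str) -> str:
--     """Translate common safety terms (single left-to-right pass)."""
--     if target_language == "si":
--         terms = [
--             ("safety", "ආරක්ෂාව"),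
--             ("hazard", "අනතුර"),
--             ("emergency", "හදිසි"),
--             ("warning", "අනතුරු ඇඟවීම"),
--             ("danger", "භයානක"),
--             ("accident", "අනතුර"),
--             ("prevention", "වැළැක්වීම"),
--         ]
--     elif target_language == "ta":
--         terms = [
--             ("safety", "பாதுகாப்பு"),
--             ("hazard", "ஆபத்து"),
--             ("emergency", "அவசரநிலை"),
--             ("warning", "எச்சரிக்கை"),
--             ("danger", "ஆபத்து"),
--             ("accident", "விபத்து"),
--             ("prevention", "தடுப்பு"),
--         ]
--     else:
--         return text
--     out = []
--     i = 0
--     n = len(text)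
--     while i < n:
--         for term, translated in terms:
--             if text.startswith(term, i):
--                 out.append(translated)
--                 i += len(term)
--                 break
--         else:
--             out.append(text[i])
--             i += 1
--     return "".join(out)
-- ===== Notes on version B (the rewrite author's own statement) =====
-- stated objective: alternative
-- what changed: Replaces the 7 sequential full-text str.replace passes with one left-to-right scan that tries the terms at each position and copies or substitutes as it goes; it trades C-implemented replace calls for a single explicit pass.
import Mathlib
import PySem

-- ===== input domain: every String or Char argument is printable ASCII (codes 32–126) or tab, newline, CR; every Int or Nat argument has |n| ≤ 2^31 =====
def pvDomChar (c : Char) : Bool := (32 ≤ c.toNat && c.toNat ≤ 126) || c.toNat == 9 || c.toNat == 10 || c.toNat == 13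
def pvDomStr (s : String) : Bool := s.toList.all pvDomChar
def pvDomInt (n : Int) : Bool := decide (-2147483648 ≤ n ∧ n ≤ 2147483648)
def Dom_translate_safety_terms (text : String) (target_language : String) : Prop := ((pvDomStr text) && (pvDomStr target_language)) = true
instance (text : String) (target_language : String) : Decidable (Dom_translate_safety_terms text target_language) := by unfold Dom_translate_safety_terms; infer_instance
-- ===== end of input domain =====

-- B replaces A's 7 sequential full-text .replace passes by one left-to-right scan
-- that tries each term at the current position and copies or substitutes (objective: alternative).

-- ===== PORT A =====
def pvSiDict : PySem.Dict String String :=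
  PySem.Dict.ofList
    [("safety", "ආරක්ෂාව"), ("hazard", "අනතුර"), ("emergency", "හදිසි"),
     ("warning", "අනතුරු ඇඟවීම"), ("danger", "භයානක"), ("accident", "අනතුර"),
     ("prevention", "වැළැක්වීම")]

def pvTaDict : PySem.Dict String String :=
  PySem.Dict.ofList
    [("safety", "பாதுகாப்பு"), ("hazard", "ஆபத்து"), ("emergency", "அவசரநிலை"),
     ("warning", "எச்சரிக்கை"), ("danger", "ஆபத்து"), ("accident", "விபத்து"),
     ("prevention", "தடுப்பு")]

def pvSafetyTranslations : PySem.Dict String (PySem.Dict String String) :=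
  PySem.Dict.ofList [("si", pvSiDict), ("ta", pvTaDict)]

def translate_safety_terms (text : String) (target_language : String) : String :=
  if pvSafetyTranslations.contains target_language = false then text
  else
    match pvSafetyTranslations.get? target_language with
    | none => text   -- unreachable: guarded by the contains test
    | some translations =>
        translations.items.foldl
          (fun translated_text p => PySem.Str.replace translated_text p.1 p.2) text

-- ===== PORT B =====
def pvSiTerms : List (List Char × List Char) :=
  [("safety".toList, "ආරක්ෂාව".toList), ("hazard".toList, "අනතුර".toList),
   ("emergency".toList, "හදිසි".toList), ("warning".toList, "අනතුරු ඇඟවීම".toList),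
   ("danger".toList, "භයානක".toList), ("accident".toList, "අනතුර".toList),
   ("prevention".toList, "වැළැක්වීම".toList)]

def pvTaTerms : List (List Char × List Char) :=
  [("safety".toList, "பாதுகாப்பு".toList), ("hazard".toList, "ஆபத்து".toList),
   ("emergency".toList, "அவசரநிலை".toList), ("warning".toList, "எச்சரிக்கை".toList),
   ("danger".toList, "ஆபத்து".toList), ("accident".toList, "விபத்து".toList),
   ("prevention".toList, "தடுப்பு".toList)]

-- Source B's while loop: at each position try the terms in order; on a match emit the
-- translation and jump past the term, otherwise emit the character and move on.
def pvScan (ps : List (List Char × List Char)) : List Char → List Char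
  | [] => []
  | c :: cs =>
    match ps.find? (fun p => p.1.isPrefixOf (c :: cs)) with
    | some (k, v) => v ++ pvScan ps (cs.drop (k.length - 1))
    | none => c :: pvScan ps cs
termination_by s => s.length
decreasing_by all_goals (simp; try omega)

def translate_safety_terms_alt (text : String) (target_language : String) : String :=
  if target_language = "si" then String.ofList (pvScan pvSiTerms text.toList)
  else if target_language = "ta" then String.ofList (pvScan pvTaTerms text.toList)
  else text

-- ===== PRECONDITION & SPEC =====
def Spec_translate_safety_terms (text : String) (target_language : String) (out : String) : Prop := out = translate_safety_terms_alt text target_language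
instance (text : String) (target_language : String) (out : String) : Decidable (Spec_translate_safety_terms text target_language out) := by unfold Spec_translate_safety_terms; infer_instance

-- ===== CLAIM (what is proved, stated in full; the proofs are below) =====
def Claim_equal_translate_safety_terms : Prop := ∀ (text : String) (target_language : String), Dom_translate_safety_terms text target_language → Spec_translate_safety_terms text target_language (translate_safety_terms text target_language)

-- ===== LEMMAS AND PROOFS =====

-- Sequential one-key replacement, as Python's str.replace computes it (nonempty key).
def pvRep1 (k v : List Char) : List Char → List Char
  | [] => []
  | c :: cs =>
    if k.isPrefixOf (c :: cs) then v ++ pvRep1 k v (cs.drop (k.length - 1))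
    else c :: pvRep1 k v cs
termination_by s => s.length
decreasing_by all_goals (simp; try omega)

-- Conditions on the key list under which one simultaneous scan equals the
-- sequential replacements: keys and values nonempty, no nonempty suffix of a later
-- key compares as prefix with an earlier key, values share no character with later keys.
def pvGoodHead (k v : List Char) (rest : List (List Char × List Char)) : Prop :=
  k ≠ [] ∧ v ≠ [] ∧
    ∀ p ∈ rest, p.1 ≠ [] ∧ (∀ t ∈ p.1.tails, t ≠ [] → ¬ t <+: k ∧ ¬ k <+: t) ∧
      ∀ c ∈ v, c ∉ p.1

def pvGood : List (List Char × List Char) → Prop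
  | [] => True
  | (k, v) :: rest =>
      pvGoodHead k v rest ∧
      rest.Pairwise (fun p q => ¬ p.1 <+: q.1 ∧ ¬ q.1 <+: p.1) ∧
      pvGood rest

-- Boolean forms of the conditions, evaluated by `rfl` on the literal term lists
def pvGoodHeadB (k v : List Char) (rest : List (List Char × List Char)) : Bool :=
  !k.isEmpty && !v.isEmpty && rest.all (fun p =>
    !p.1.isEmpty &&
    p.1.tails.all (fun t => t.isEmpty || (!t.isPrefixOf k && !k.isPrefixOf t)) &&
    v.all (fun c => !p.1.contains c))

def pvPairwiseB : List (List Char × List Char) → Bool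
  | [] => true
  | p :: rest => rest.all (fun q => !p.1.isPrefixOf q.1 && !q.1.isPrefixOf p.1) && pvPairwiseB rest

def pvGoodB : List (List Char × List Char) → Bool
  | [] => true
  | (k, v) :: rest => pvGoodHeadB k v rest && pvPairwiseB rest && pvGoodB rest

lemma pvGoodHeadB_correct (k v : List Char) (rest : List (List Char × List Char))
    (h : pvGoodHeadB k v rest = true) : pvGoodHead k v rest := by
  have hconv : ∀ (a b : List Char), (!a.isPrefixOf b) = true → ¬ a <+: b := by
    intro a b hb hab
    rw [List.isPrefixOf_iff_prefix.mpr hab] at hb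
    simp at hb
  unfold pvGoodHeadB at h
  simp only [Bool.and_eq_true, List.all_eq_true, Bool.or_eq_true] at h
  obtain ⟨⟨hk, hv⟩, hall⟩ := h
  refine ⟨by simpa using hk, by simpa using hv, fun p hp => ?_⟩
  obtain ⟨⟨hne, htails⟩, hdisj⟩ := hall p hp
  refine ⟨by simpa using hne, fun t ht htne => ?_, fun c hc => ?_⟩
  · rcases htails t ht with h | h
    · exact absurd (by simpa using h) htne
    · exact ⟨hconv _ _ h.1, hconv _ _ h.2⟩
  · simpa using hdisj c hc

lemma pvPairwiseB_correct : ∀ ps : List (List Char × List Char), pvPairwiseB ps = true →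
    ps.Pairwise (fun p q => ¬ p.1 <+: q.1 ∧ ¬ q.1 <+: p.1) := by
  intro ps
  induction ps with
  | nil => intro _; exact List.Pairwise.nil
  | cons p rest ih =>
    intro h
    unfold pvPairwiseB at h
    rw [Bool.and_eq_true] at h
    refine List.Pairwise.cons (fun q hq => ?_) (ih h.2)
    have h2 := List.all_eq_true.mp h.1 q hq
    simp only [Bool.and_eq_true] at h2
    have hconv : ∀ (a b : List Char), (!a.isPrefixOf b) = true → ¬ a <+: b := by
      intro a b hb hab
      rw [List.isPrefixOf_iff_prefix.mpr hab] at hb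
      simp at hb
    exact ⟨hconv _ _ h2.1, hconv _ _ h2.2⟩

lemma pvGoodB_correct : ∀ ps : List (List Char × List Char), pvGoodB ps = true → pvGood ps := by
  intro ps
  induction ps with
  | nil => intro _; trivial
  | cons p rest ih =>
    obtain ⟨k, v⟩ := p
    intro h
    unfold pvGoodB at h
    rw [Bool.and_eq_true, Bool.and_eq_true] at h
    exact ⟨pvGoodHeadB_correct k v rest h.1.1, pvPairwiseB_correct rest h.1.2, ih h.2⟩

-- shape lemmas
lemma pvScan_nil (ps : List (List Char × List Char)) : pvScan ps [] = [] := by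
  simp [pvScan]

lemma pvScan_pos (ps : List (List Char × List Char)) (c : Char) (cs k v : List Char)
    (h : ps.find? (fun p => p.1.isPrefixOf (c :: cs)) = some (k, v)) :
    pvScan ps (c :: cs) = v ++ pvScan ps (cs.drop (k.length - 1)) := by
  rw [pvScan, h]

lemma pvScan_neg (ps : List (List Char × List Char)) (c : Char) (cs : List Char)
    (h : ps.find? (fun p => p.1.isPrefixOf (c :: cs)) = none) :
    pvScan ps (c :: cs) = c :: pvScan ps cs := by
  rw [pvScan, h]

lemma pvRep1_pos (k v : List Char) (c : Char) (cs : List Char)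
    (h : k.isPrefixOf (c :: cs) = true) :
    pvRep1 k v (c :: cs) = v ++ pvRep1 k v (cs.drop (k.length - 1)) := by
  rw [pvRep1, if_pos h]

lemma pvRep1_neg (k v : List Char) (c : Char) (cs : List Char)
    (h : ¬ k.isPrefixOf (c :: cs) = true) :
    pvRep1 k v (c :: cs) = c :: pvRep1 k v cs := by
  rw [pvRep1, if_neg h]

lemma pvScan_nil_ps (s : List Char) : pvScan [] s = s := by
  induction s with
  | nil => simp [pvScan]
  | cons c cs ih => rw [pvScan_neg [] c cs (by simp)]; rw [ih]

-- PySem's replace (nonempty old) is pvRep1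
lemma replace_go_eq (old new : List Char) (hold : old ≠ []) :
    ∀ (fuel : Nat) (l acc : List Char), l.length ≤ fuel →
      PySem.Chars.replace.go old new fuel l acc = acc.reverse ++ pvRep1 old new l := by
  intro fuel
  induction fuel with
  | zero =>
    intro l acc h
    have hl : l = [] := by cases l <;> simp_all
    subst hl
    rw [PySem.Chars.replace.go.eq_1]
    simp [pvRep1]
  | succ n ih =>
    intro l acc h
    cases l with
    | nil => rw [PySem.Chars.replace.go.eq_def]; simp [pvRep1]
    | cons c t =>
      rw [PySem.Chars.replace.go.eq_def]
      obtain ⟨a, old', rfl⟩ := List.exists_cons_of_ne_nil hold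
      by_cases hp : (a :: old').isPrefixOf (c :: t) = true
      · simp only [hp, if_true]
        rw [ih _ _ (by simp at h ⊢; omega)]
        rw [pvRep1_pos _ _ _ _ hp]
        simp [List.append_assoc]
      · simp only [hp, if_false, Bool.false_eq_true]
        rw [ih t (c :: acc) (by simpa using Nat.le_of_succ_le_succ h)]
        rw [pvRep1_neg _ _ _ _ hp]
        simp

lemma replace_eq_pvRep1 (s old new : List Char) (hold : old ≠ []) :
    PySem.Chars.replace s old new = pvRep1 old new s := by
  rw [PySem.Chars.replace]
  rw [if_neg (by simpa [List.isEmpty_iff] using hold)]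
  rw [replace_go_eq old new hold s.length s [] le_rfl]
  simp

-- scanning past inert emitted text (no key shares a character with v)
lemma pvScan_append_inert (ps : List (List Char × List Char))
    (hne : ∀ p ∈ ps, p.1 ≠ []) (v : List Char)
    (hdisj : ∀ p ∈ ps, ∀ c ∈ v, c ∉ p.1) (X : List Char) :
    pvScan ps (v ++ X) = v ++ pvScan ps X := by
  induction v with
  | nil => simp
  | cons d v' ih =>
    have hfind : ps.find? (fun p => p.1.isPrefixOf (d :: (v' ++ X))) = none := by
      rw [List.find?_eq_none]
      intro p hp hb
      have hpre : p.1 <+: d :: (v' ++ X) := List.isPrefixOf_iff_prefix.mp hb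
      cases hq : p.1 with
      | nil => exact (hne p hp) hq
      | cons e es =>
        rw [hq] at hpre
        have hed : e = d := (List.cons_prefix_cons.mp hpre).1
        exact (hdisj p hp d (by simp)) (by simp [hq, hed.symm])
    rw [List.cons_append, pvScan_neg _ _ _ hfind]
    rw [ih (fun p hp c hc => hdisj p hp c (by simp [hc]))]
    simp

-- a word absent from s and sharing no character with v stays absent as a prefix after replacement
lemma not_prefix_pvRep1 (k v : List Char) (hv : v ≠ []) :
    ∀ (s w : List Char), (∀ c ∈ v, c ∉ w) → ¬ w <+: s → ¬ w <+: pvRep1 k v s := by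
  intro s
  induction s with
  | nil => intro w hd hnp; simpa [pvRep1] using hnp
  | cons c cs ih =>
    intro w hd hnp
    by_cases hp : k.isPrefixOf (c :: cs) = true
    · rw [pvRep1_pos _ _ _ _ hp]
      intro hw
      cases hw0 : w with
      | nil => exact hnp (by simp [hw0])
      | cons d w' =>
        obtain ⟨e, v'', rfl⟩ := List.exists_cons_of_ne_nil hv
        subst hw0
        rw [List.cons_append] at hw
        have hde : d = e := (List.cons_prefix_cons.mp hw).1
        have : e ∉ d :: w' := hd e (by simp)
        exact this (by simp [hde.symm])
    · rw [pvRep1_neg _ _ _ _ hp]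
      intro hw
      cases hw0 : w with
      | nil => exact hnp (by simp [hw0])
      | cons d w' =>
        subst hw0
        obtain ⟨hdc, hw'⟩ := List.cons_prefix_cons.mp hw
        have hnp' : ¬ w' <+: cs := fun h => hnp (by rw [hdc]; exact List.cons_prefix_cons.mpr ⟨rfl, h⟩)
        exact ih w' (fun c' hc' hm => hd c' hc' (by simp [hm])) hnp' hw'

-- replacement skips a region with no occurrence of the key
lemma pvRep1_skip (k v : List Char) :
    ∀ (m : Nat) (s : List Char), m ≤ s.length → (∀ j < m, ¬ k <+: s.drop j) →
      pvRep1 k v s = s.take m ++ pvRep1 k v (s.drop m) := by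
  intro m
  induction m with
  | zero => intro s _ _; simp
  | succ m ih =>
    intro s hlen hno
    cases s with
    | nil => simp at hlen
    | cons c cs =>
      have h0 : ¬ k <+: (c :: cs) := by simpa using hno 0 (by omega)
      rw [pvRep1_neg _ _ _ _ (by simpa [List.isPrefixOf_iff_prefix] using h0)]
      rw [ih cs (by simpa using Nat.le_of_succ_le_succ hlen)
        (fun j hj => by simpa [List.drop_succ_cons] using hno (j + 1) (by omega))]
      simp

-- no occurrence of k strictly inside a k'-occurrence, by the suffix condition
lemma no_inner_occurrence (k k' : List Char)
    (hC : ∀ t ∈ k'.tails, t ≠ [] → ¬ t <+: k ∧ ¬ k <+: t)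
    (s : List Char) (hpre : k' <+: s) :
    ∀ j, 1 ≤ j → j < k'.length → ¬ k <+: s.drop j := by
  intro j h1 hj hk2
  obtain ⟨u, rfl⟩ := hpre
  rw [List.drop_append_of_le_length (le_of_lt hj)] at hk2
  have ht : k'.drop j ∈ k'.tails := (List.mem_tails _ _).mpr (List.drop_suffix _ _)
  have htne : k'.drop j ≠ [] := by
    intro h
    have := congrArg List.length h
    simp at this
    omega
  have h2 := hC (k'.drop j) ht htne
  rcases List.prefix_or_prefix_of_prefix hk2 (List.prefix_append (k'.drop j) u) with h | h
  · exact h2.2 h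
  · exact h2.1 h

lemma find?_eq_of_agree {α : Type} (P Q : α → Bool) :
    ∀ (l : List α) (q : α), l.find? P = some q → Q q = true →
      (∀ p ∈ l, Q p = true → P p = true) → l.find? Q = some q := by
  intro l
  induction l with
  | nil => intro q h; simp at h
  | cons a l ih =>
    intro q hfind hQq hall
    by_cases hP : P a = true
    · rw [List.find?_cons_of_pos hP] at hfind
      have : q = a := by simpa using hfind.symm
      subst this
      rw [List.find?_cons_of_pos hQq]
    · rw [List.find?_cons_of_neg (by simpa using hP)] at hfind
      have hQa : ¬ Q a = true := fun h => hP (hall a (by simp) h)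
      rw [List.find?_cons_of_neg (by simpa using hQa)]
      exact ih q hfind hQq (fun p hp => hall p (by simp [hp]))

-- the fusion step: trying key k first in the scan = replacing k everywhere first
lemma pvScan_cons_fusion (k v : List Char) (rest : List (List Char × List Char))
    (hG : pvGoodHead k v rest)
    (hP : rest.Pairwise (fun p q => ¬ p.1 <+: q.1 ∧ ¬ q.1 <+: p.1)) :
    ∀ s, pvScan ((k, v) :: rest) s = pvScan rest (pvRep1 k v s) := by
  obtain ⟨hk, hv, hrest⟩ := hG
  have main : ∀ n (s : List Char), s.length ≤ n →
      pvScan ((k, v) :: rest) s = pvScan rest (pvRep1 k v s) := by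
    intro n
    induction n with
    | zero =>
      intro s hs
      have : s = [] := by cases s <;> simp_all
      subst this
      simp [pvScan_nil, pvRep1]
    | succ n ih =>
      intro s hs
      cases s with
      | nil => simp [pvScan_nil, pvRep1]
      | cons c cs =>
        by_cases hp : k.isPrefixOf (c :: cs) = true
        · have hfind : ((k, v) :: rest).find? (fun p => p.1.isPrefixOf (c :: cs)) = some (k, v) :=
            List.find?_cons_of_pos (by simpa using hp)
          rw [pvScan_pos _ _ _ _ _ hfind, pvRep1_pos _ _ _ _ hp]
          rw [pvScan_append_inert rest (fun p hp' => (hrest p hp').1) v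
            (fun p hp' => (hrest p hp').2.2)]
          congr 1
          exact ih _ (by simp at hs ⊢; omega)
        · cases hf2 : rest.find? (fun p => p.1.isPrefixOf (c :: cs)) with
          | none =>
            have hfind : ((k, v) :: rest).find? (fun p => p.1.isPrefixOf (c :: cs)) = none := by
              rw [List.find?_cons_of_neg (by simpa using hp)]; exact hf2
            rw [pvScan_neg _ _ _ hfind, pvRep1_neg _ _ _ _ hp]
            have hfind2 : rest.find? (fun p => p.1.isPrefixOf (c :: pvRep1 k v cs)) = none := by
              rw [List.find?_eq_none]
              intro p hp'
              have hnp : ¬ p.1 <+: (c :: cs) := by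
                have := List.find?_eq_none.mp hf2 p hp'
                simpa [List.isPrefixOf_iff_prefix] using this
              have hni := not_prefix_pvRep1 k v hv (c :: cs) p.1 ((hrest p hp').2.2) hnp
              rw [pvRep1_neg _ _ _ _ hp] at hni
              simpa [List.isPrefixOf_iff_prefix] using hni
            rw [pvScan_neg _ _ _ hfind2]
            congr 1
            exact ih cs (by simpa using Nat.le_of_succ_le_succ hs)
          | some kv =>
            obtain ⟨k', v'⟩ := kv
            have hfind : ((k, v) :: rest).find? (fun p => p.1.isPrefixOf (c :: cs)) = some (k', v') := by
              rw [List.find?_cons_of_neg (by simpa using hp)]; exact hf2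
            have hmem : (k', v') ∈ rest := List.mem_of_find?_eq_some hf2
            have hpre' : k' <+: (c :: cs) := by
              have := List.find?_some hf2
              simpa [List.isPrefixOf_iff_prefix] using this
            obtain ⟨hk'ne, hC', hdisj'⟩ := hrest (k', v') hmem
            rw [pvScan_pos _ _ _ _ _ hfind]
            have hnok : ∀ j < k'.length, ¬ k <+: (c :: cs).drop j := by
              intro j hj
              rcases Nat.eq_zero_or_pos j with rfl | hjp
              · simpa [List.isPrefixOf_iff_prefix] using hp
              · exact no_inner_occurrence k k' hC' (c :: cs) hpre' j hjp hj
            have hlen' : k'.length ≤ (c :: cs).length := hpre'.length_le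
            have hseq : pvRep1 k v (c :: cs) = k' ++ pvRep1 k v ((c :: cs).drop k'.length) := by
              rw [pvRep1_skip k v k'.length (c :: cs) hlen' hnok]
              congr 1
              exact (List.prefix_iff_eq_take.mp hpre').symm
            rw [hseq]
            obtain ⟨a, k'', rfl⟩ := List.exists_cons_of_ne_nil hk'ne
            have hQ : rest.find? (fun p => p.1.isPrefixOf
                (a :: (k'' ++ pvRep1 k v ((c :: cs).drop (a :: k'').length)))) = some (a :: k'', v') := by
              apply find?_eq_of_agree (fun p => p.1.isPrefixOf (c :: cs)) _ rest (a :: k'', v') hf2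
              · simp only [List.isPrefixOf_iff_prefix]
                exact (List.prefix_append (a :: k'') _).trans (by rw [List.cons_append])
              · intro p hp' hQp
                simp only [List.isPrefixOf_iff_prefix] at hQp ⊢
                have hQp' : p.1 <+: (a :: k'') ++ pvRep1 k v ((c :: cs).drop (a :: k'').length) := by
                  simpa [List.cons_append] using hQp
                rcases List.prefix_or_prefix_of_prefix hQp' (List.prefix_append (a :: k'') _) with h | h
                · exact h.trans hpre'
                · by_cases hpe : p = (a :: k'', v')
                  · subst hpe; exact hpre'
                  · have hsym : Symmetric (fun (p q : List Char × List Char) =>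
                        ¬ p.1 <+: q.1 ∧ ¬ q.1 <+: p.1) := fun x y h => ⟨h.2, h.1⟩
                    have := (hP.forall hsym) hmem hp' (Ne.symm hpe)
                    exact absurd h this.1
            rw [List.cons_append, pvScan_pos rest a _ (a :: k'') v' hQ]
            have hdropR : (k'' ++ pvRep1 k v ((c :: cs).drop (a :: k'').length)).drop
                ((a :: k'').length - 1) = pvRep1 k v ((c :: cs).drop (a :: k'').length) := by
              simp
            rw [hdropR]
            congr 1
            have hdrop : (c :: cs).drop (a :: k'').length = cs.drop ((a :: k'').length - 1) := by
              simp
            rw [hdrop]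
            exact ih _ (by simp at hs ⊢; omega)
  exact fun s => main s.length s le_rfl

lemma pvScan_eq_foldl (ps : List (List Char × List Char)) (h : pvGood ps) :
    ∀ s, pvScan ps s = ps.foldl (fun acc p => pvRep1 p.1 p.2 acc) s := by
  revert h
  induction ps with
  | nil => intro _ s; simp [pvScan_nil_ps]
  | cons p rest ih =>
    obtain ⟨k, v⟩ := p
    intro h s
    obtain ⟨hG, hP, hrest⟩ := h
    rw [pvScan_cons_fusion k v rest hG hP s, ih hrest (pvRep1 k v s)]
    simp

-- the A-side fold, moved to the character level
lemma toList_foldl_replace (pairs : List (String × String))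
    (h : pairs.all (fun p => !p.1.toList.isEmpty) = true) :
    ∀ t : String, (pairs.foldl (fun acc p => PySem.Str.replace acc p.1 p.2) t).toList
      = pairs.foldl (fun acc p => pvRep1 p.1.toList p.2.toList acc) t.toList := by
  induction pairs with
  | nil => intro t; simp
  | cons p rest ih =>
    intro t
    rw [List.all_cons, Bool.and_eq_true] at h
    rw [List.foldl_cons, List.foldl_cons]
    rw [ih h.2 (PySem.Str.replace t p.1 p.2)]
    rw [PySem.Str.toList_replace]
    rw [replace_eq_pvRep1 _ _ _ (by simpa using h.1)]

def pvSiPairsStr : List (String × String) :=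
  [("safety", "ආරක්ෂාව"), ("hazard", "අනතුර"), ("emergency", "හදිසි"),
   ("warning", "අනතුරු ඇඟවීම"), ("danger", "භයානක"), ("accident", "අනතුර"),
   ("prevention", "වැළැක්වීම")]

def pvTaPairsStr : List (String × String) :=
  [("safety", "பாதுகாப்பு"), ("hazard", "ஆபத்து"), ("emergency", "அவசரநிலை"),
   ("warning", "எச்சரிக்கை"), ("danger", "ஆபத்து"), ("accident", "விபத்து"),
   ("prevention", "தடுப்பு")]

lemma A_si (text : String) :
    translate_safety_terms text "si"
      = pvSiPairsStr.foldl (fun acc p => PySem.Str.replace acc p.1 p.2) text := rfl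

lemma A_ta (text : String) :
    translate_safety_terms text "ta"
      = pvTaPairsStr.foldl (fun acc p => PySem.Str.replace acc p.1 p.2) text := rfl

lemma si_fold_chars (X : List Char) :
    pvSiPairsStr.foldl (fun acc p => pvRep1 p.1.toList p.2.toList acc) X
      = pvSiTerms.foldl (fun acc p => pvRep1 p.1 p.2 acc) X := rfl

lemma ta_fold_chars (X : List Char) :
    pvTaPairsStr.foldl (fun acc p => pvRep1 p.1.toList p.2.toList acc) X
      = pvTaTerms.foldl (fun acc p => pvRep1 p.1 p.2 acc) X := rfl

lemma items_mk_any_eq_false (tl : String) (h1 : tl ≠ "si") (h2 : tl ≠ "ta") :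
    pvSafetyTranslations.contains tl = false := by
  have hitems : pvSafetyTranslations.items = [("si", pvSiDict), ("ta", pvTaDict)] := rfl
  rw [PySem.Dict.contains, hitems]
  simp only [List.any_cons, List.any_nil, Bool.or_false]
  have e1 : ("si" == tl) = false := by
    simpa using fun h => h1 h.symm
  have e2 : ("ta" == tl) = false := by
    simpa using fun h => h2 h.symm
  rw [e1, e2]
  rfl

-- ===== VERDICT (by name: the statement is the Claim_ definition above) =====
theorem translate_safety_terms_spec : Claim_equal_translate_safety_terms := by
  intro text tl _
  show translate_safety_terms text tl = translate_safety_terms_alt text tl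
  by_cases h1 : tl = "si"
  · subst h1
    apply String.toList_inj.mp
    rw [A_si, toList_foldl_replace pvSiPairsStr rfl text, si_fold_chars]
    rw [show translate_safety_terms_alt text "si"
        = String.ofList (pvScan pvSiTerms text.toList) from by
      simp [translate_safety_terms_alt]]
    rw [String.toList_ofList]
    exact (pvScan_eq_foldl pvSiTerms (pvGoodB_correct _ rfl) text.toList).symm
  · by_cases h2 : tl = "ta"
    · subst h2
      apply String.toList_inj.mp
      rw [A_ta, toList_foldl_replace pvTaPairsStr rfl text, ta_fold_chars]
      rw [show translate_safety_terms_alt text "ta"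
          = String.ofList (pvScan pvTaTerms text.toList) from by
        simp [translate_safety_terms_alt]]
      rw [String.toList_ofList]
      exact (pvScan_eq_foldl pvTaTerms (pvGoodB_correct _ rfl) text.toList).symm
    · rw [translate_safety_terms, if_pos (items_mk_any_eq_false tl h1 h2)]
      simp [translate_safety_terms_alt, h1, h2]
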